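-- pv_equiv track=rewrite | github.com/hedge-wan/hedge | hedge-te/code/util.py | effective_throughput
-- ===== SOURCE A (Python) =====
-- def effective_throughput(postproc_lp_results, original_tunnel_allocations):
--     new_tunnel_allocations = {}
--
--     for tunnel in original_tunnel_allocations:
--         if tunnel in postproc_lp_results:
--             new_tunnel_allocations[tunnel] = original_tunnel_allocations[tunnel] - postproc_lp_results[tunnel]
--         else:
--             new_tunnel_allocations[tunnel] = original_tunnel_allocations[tunnel]
--
--     return new_tunnel_allocations
-- ===== SOURCE B (Python) =====
-- def effective_throughput(postproc_lp_results, original_tunnel_allocations):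
--     # Signed-delta aggregation: stream the original allocations followed by the
--     # negated postproc usage for known tunnels, then sum the stream per key.
--     deltas = list(original_tunnel_allocations.items())
--     deltas += [(t, -u) for t, u in postproc_lp_results.items()
--                if t in original_tunnel_allocations]
--     new_tunnel_allocations = {}
--     for t, d in deltas:
--         new_tunnel_allocations[t] = new_tunnel_allocations.get(t, 0) + d
--     return new_tunnel_allocations
-- ===== Notes on version B (the rewrite author's own statement) =====
-- stated objective: alternative
-- what changed: B builds a signed delta stream (original items followed by negated postproc usage for known tunnels) and aggregates it with one Counter-style sum-per-key pass, instead of A's per-key branching subtraction loop.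
import Mathlib
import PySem

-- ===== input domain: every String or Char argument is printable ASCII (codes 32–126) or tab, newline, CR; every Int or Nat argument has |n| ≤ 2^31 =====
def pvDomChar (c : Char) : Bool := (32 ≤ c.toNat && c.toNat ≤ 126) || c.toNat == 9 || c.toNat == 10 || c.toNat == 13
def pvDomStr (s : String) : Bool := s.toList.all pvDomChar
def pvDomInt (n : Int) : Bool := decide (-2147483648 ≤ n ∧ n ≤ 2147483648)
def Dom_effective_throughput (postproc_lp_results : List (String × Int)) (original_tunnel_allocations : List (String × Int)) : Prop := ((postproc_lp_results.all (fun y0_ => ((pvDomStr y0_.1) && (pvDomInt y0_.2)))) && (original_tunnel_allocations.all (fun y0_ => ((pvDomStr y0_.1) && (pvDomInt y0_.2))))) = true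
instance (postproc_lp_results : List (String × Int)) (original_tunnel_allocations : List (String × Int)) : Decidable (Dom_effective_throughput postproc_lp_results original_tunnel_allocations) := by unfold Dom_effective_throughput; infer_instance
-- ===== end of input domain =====

-- B aggregates a signed delta stream (original items, then negated postproc usage for
-- known tunnels) with one sum-per-key pass, instead of A's per-key branching subtraction.


-- ===== PORT A =====
-- Dict parameters arrive as association lists; PySem.Dict.ofList rebuilds the Python dict.
-- 'original_tunnel_allocations[tunnel]' always succeeds (tunnel ranges over its own keys), ported as getD.
def effective_throughput (postproc_lp_results : List (String × Int)) (original_tunnel_allocations : List (String × Int)) : List (String × Int) :=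
  let pd := PySem.Dict.ofList postproc_lp_results
  let od := PySem.Dict.ofList original_tunnel_allocations
  (od.keys.foldl (fun acc tunnel =>
      if pd.contains tunnel then
        acc.insert tunnel (od.getD tunnel 0 - pd.getD tunnel 0)
      else
        acc.insert tunnel (od.getD tunnel 0))
    PySem.Dict.empty).items

-- ===== PORT B =====
-- the delta stream (original items ++ negated postproc usage for known tunnels),
-- summed per key into a fresh dict via get(t, 0) + d
def effective_throughput_alt (postproc_lp_results : List (String × Int)) (original_tunnel_allocations : List (String × Int)) : List (String × Int) :=
  let od := PySem.Dict.ofList original_tunnel_allocations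
  let deltas := od.items ++
    (((PySem.Dict.ofList postproc_lp_results).items.filter (fun tu => od.contains tu.1)).map
      (fun tu => (tu.1, -tu.2)))
  (deltas.foldl (fun d tv => d.insert tv.1 (d.getD tv.1 0 + tv.2)) PySem.Dict.empty).items

-- ===== PRECONDITION & SPEC =====
def Spec_effective_throughput (postproc_lp_results : List (String × Int)) (original_tunnel_allocations : List (String × Int)) (out : List (String × Int)) : Prop := out = effective_throughput_alt postproc_lp_results original_tunnel_allocations
instance (postproc_lp_results : List (String × Int)) (original_tunnel_allocations : List (String × Int)) (out : List (String × Int)) : Decidable (Spec_effective_throughput postproc_lp_results original_tunnel_allocations out) := by unfold Spec_effective_throughput; infer_instance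

-- ===== CLAIM (what is proved, stated in full; the proofs are below) =====
def Claim_equal_effective_throughput : Prop := ∀ (postproc_lp_results : List (String × Int)) (original_tunnel_allocations : List (String × Int)), Dom_effective_throughput postproc_lp_results original_tunnel_allocations → Spec_effective_throughput postproc_lp_results original_tunnel_allocations (effective_throughput postproc_lp_results original_tunnel_allocations)

-- ===== LEMMAS AND PROOFS =====

-- Phase 1 of B's aggregation: summing a stream of FRESH distinct keys into d just appends.
lemma sum_fold_fresh (l : List (String × Int)) :
    ∀ (d : PySem.Dict String Int), (∀ p ∈ l, d.contains p.1 = false) → (l.map (fun x => x.1)).Nodup →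
      l.foldl (fun d tv => d.insert tv.1 (d.getD tv.1 0 + tv.2)) d = PySem.Dict.mk (d.items ++ l) := by
  induction l with
  | nil => intro d _ _; apply PySem.Dict.ext; simp
  | cons hd t ih =>
      obtain ⟨k, v⟩ := hd
      intro d hfresh hnd
      have hk : d.contains k = false := hfresh (k, v) (by simp)
      have hget : d.getD k 0 = 0 := PySem.Dict.getD_of_not_contains d 0 hk
      have hpair : (∀ (x : ℤ), (k, x) ∉ t) ∧ (t.map (fun x => x.1)).Nodup := by simpa using hnd
      simp only [List.foldl_cons, hget, zero_add]
      rw [ih (d.insert k v) (fun p hp => by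
            have hne : p.1 ≠ k := fun h => hpair.1 p.2 (by cases p; simp_all)
            rw [PySem.Dict.contains_insert]
            simp [hne, hfresh p (List.mem_cons_of_mem _ hp)]) hpair.2]
      apply PySem.Dict.ext
      rw [PySem.Dict.items_insert_of_not_contains d v hk]
      simp

-- Phase 2: summing a stream of distinct keys ALL already in d overwrites in place,
-- adding each key's stream value to its entry and keeping d's item order.
lemma sum_fold_present (l : List (String × Int)) :
    ∀ (d : PySem.Dict String Int), d.keys.Nodup → (l.map (fun x => x.1)).Nodup →
      (∀ p ∈ l, d.contains p.1 = true) →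
      (l.foldl (fun d tv => d.insert tv.1 (d.getD tv.1 0 + tv.2)) d).items
        = d.items.map (fun kv => (kv.1, kv.2 + (PySem.Dict.mk l).getD kv.1 0)) := by
  induction l with
  | nil =>
      intro d _ _ _
      simp [PySem.Dict.getD_eq_get?_getD, PySem.Dict.get?]
  | cons hd t ih =>
      obtain ⟨k, v⟩ := hd
      intro d hdnd hlnd hpres
      have hpair : (∀ (x : ℤ), (k, x) ∉ t) ∧ (t.map (fun x => x.1)).Nodup := by simpa using hlnd
      have hknot : k ∉ t.map (fun x => x.1) := by
        intro h
        obtain ⟨p, hp, hpk⟩ := List.mem_map.mp h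
        exact hpair.1 p.2 (by cases p; simp_all)
      have hgt0 : (PySem.Dict.mk t).getD k 0 = 0 := by
        rw [PySem.Dict.getD_eq_get?_getD,
          (PySem.Dict.get?_eq_none_iff_not_mem_keys _ _).mpr (by simpa [PySem.Dict.keys_mk] using hknot)]
        rfl
      have hc : d.contains k = true := hpres (k, v) (by simp)
      simp only [List.foldl_cons]
      have hd' := d.insert k (d.getD k 0 + v)
      have hd'nd : (d.insert k (d.getD k 0 + v)).keys.Nodup := PySem.Dict.nodup_keys_insert _ _ _ hdnd
      rw [ih _ hd'nd hpair.2 (fun p hp => by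
            rw [PySem.Dict.contains_insert]
            simp [hpres p (List.mem_cons_of_mem _ hp)])]
      rw [PySem.Dict.items_insert_of_contains d _ hc, List.map_map]
      apply List.map_congr_left
      intro p hp
      by_cases hpk : p.1 = k
      · have hmem : (k, p.2) ∈ d.items := by
          have : p = (k, p.2) := by cases p; simp_all
          exact this ▸ hp
        have hval : d.getD k 0 = p.2 := PySem.Dict.getD_of_mem_items d hmem hdnd 0
        simp [Function.comp, hpk, hval, hgt0, PySem.Dict.getD_eq_get?_getD,
          PySem.Dict.get?_mk_cons]
      · have hbk : (p.1 == k) = false := by simp [hpk]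
        simp [Function.comp, hbk, PySem.Dict.getD_eq_get?_getD, PySem.Dict.get?_mk_cons,
          Ne.symm hpk]

lemma ports_agree (p o : List (String × Int)) :
    effective_throughput p o = effective_throughput_alt p o := by
  simp only [effective_throughput, effective_throughput_alt]
  set pd := PySem.Dict.ofList p with hpd
  set od := PySem.Dict.ofList o with hod
  have hodnd : od.keys.Nodup := PySem.Dict.nodup_keys_ofList o
  have hpdnd : (pd.items.map (fun x => x.1)).Nodup := PySem.Dict.nodup_keys_ofList p
  set sfx := ((pd.items.filter (fun tu => od.contains tu.1)).map (fun tu => (tu.1, -tu.2)))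
    with hsfx
  -- B side: split the stream, collapse phase 1 to od itself, characterise phase 2
  have hsub : (sfx.map (fun x => x.1)).Sublist (pd.items.map (fun x => x.1)) := by
    rw [hsfx, List.map_map]
    have : ((fun x => x.1) ∘ (fun tu : String × Int => (tu.1, -tu.2))) = (fun x : String × Int => x.1) := by
      funext x; rfl
    rw [this]
    exact List.Sublist.map _ List.filter_sublist
  have hsnd : (sfx.map (fun x => x.1)).Nodup := hpdnd.sublist hsub
  have hskeys : ∀ q ∈ sfx, od.contains q.1 = true := by
    intro q hq
    rw [hsfx] at hq
    obtain ⟨tu, htu, rfl⟩ := List.mem_map.mp hq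
    exact (List.mem_filter.mp htu).2
  rw [List.foldl_append,
    sum_fold_fresh od.items PySem.Dict.empty (fun q _ => PySem.Dict.contains_empty q.1) hodnd]
  have hmkod : PySem.Dict.mk (PySem.Dict.empty.items ++ od.items) = od := by
    apply PySem.Dict.ext; simp [PySem.Dict.empty]
  rw [hmkod, sum_fold_present sfx od hodnd hsnd hskeys]
  -- A side: push the branch into the inserted value, then it is a fresh-key append loop
  have hfun : (fun (acc : PySem.Dict String Int) tunnel =>
      if pd.contains tunnel then
        acc.insert tunnel (od.getD tunnel 0 - pd.getD tunnel 0)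
      else
        acc.insert tunnel (od.getD tunnel 0))
    = (fun acc tunnel => acc.insert tunnel
        (if pd.contains tunnel then od.getD tunnel 0 - pd.getD tunnel 0 else od.getD tunnel 0)) := by
    funext acc t
    by_cases h : pd.contains t = true <;> simp [h]
  rw [hfun, PySem.Dict.items_foldl_insert_fresh od.keys (fun t => t)
      (fun t => if pd.contains t then od.getD t 0 - pd.getD t 0 else od.getD t 0)
      PySem.Dict.empty (fun a _ => PySem.Dict.contains_empty a) (by simpa using hodnd)]
  rw [PySem.Dict.items_eq_map_keys od hodnd 0, List.map_map]
  simp only [show (PySem.Dict.empty : PySem.Dict String Int).items = [] from rfl, List.nil_append]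
  apply List.map_congr_left
  intro k hk
  simp only [Function.comp]
  by_cases hc : pd.contains k = true
  · -- k carried a negated delta in the stream: its entry in (mk sfx) is -(pd.getD k 0)
    have hget : ∃ v, pd.get? k = some v := by
      rcases h : pd.get? k with _ | v
      · rw [PySem.Dict.contains_eq_isSome_get?, h] at hc; simp at hc
      · exact ⟨v, rfl⟩
    obtain ⟨v, hv⟩ := hget
    have hval : pd.getD k 0 = v := by rw [PySem.Dict.getD_eq_get?_getD, hv]; rfl
    have hmemi : (k, v) ∈ pd.items := PySem.Dict.mem_items_of_get?_eq_some pd hv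
    have hodk : od.contains k = true := (PySem.Dict.contains_iff_mem_keys od k).mpr hk
    have hmems : (k, -v) ∈ sfx := by
      rw [hsfx]
      exact List.mem_map.mpr ⟨(k, v), List.mem_filter.mpr ⟨hmemi, hodk⟩, rfl⟩
    have hgs : (PySem.Dict.mk sfx).getD k 0 = -v := by
      exact PySem.Dict.getD_of_mem_items _ hmems hsnd 0
    rw [if_pos hc, hgs, hval]
    ring_nf
  · -- k never occurs in the stream's postproc part
    have hknot : k ∉ sfx.map (fun x => x.1) := by
      intro hmem
      obtain ⟨q, hq, hqk⟩ := List.mem_map.mp hmem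
      rw [hsfx] at hq
      obtain ⟨tu, htu, rfl⟩ := List.mem_map.mp hq
      have : tu.1 ∈ pd.items.map (fun x => x.1) :=
        List.mem_map.mpr ⟨tu, (List.mem_filter.mp htu).1, rfl⟩
      exact absurd ((PySem.Dict.contains_iff_mem_keys pd k).mpr (hqk ▸ this)) (by simp [hc])
    have hgs : (PySem.Dict.mk sfx).getD k 0 = 0 := by
      rw [PySem.Dict.getD_eq_get?_getD,
        (PySem.Dict.get?_eq_none_iff_not_mem_keys _ _).mpr (by simpa [PySem.Dict.keys_mk] using hknot)]
      rfl
    rw [if_neg hc, hgs, add_zero]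

-- ===== VERDICT (by name: the statement is the Claim_ definition above) =====
theorem effective_throughput_spec : Claim_equal_effective_throughput := by
  intro p o _
  unfold Spec_effective_throughput
  exact ports_agree p o
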